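-- pv_equiv track=rewrite | github.com/Jamin252/Year3Proj | Code/evaluate_real_asr_wer_orc.py | _speaker_texts
-- ===== SOURCE A (Python) =====
-- Segment = tuple[str, str]
--
-- def _speaker_texts(segments: list[Segment]) -> list[str]:
--     speaker_order: list[str] = []
--     speaker_words: dict[str, list[str]] = {}
--
--     for speaker, text in segments:
--         if speaker not in speaker_words:
--             speaker_words[speaker] = []
--             speaker_order.append(speaker)
--         speaker_words[speaker].append(text)
--
--     return [" ".join(speaker_words[speaker]) for speaker in speaker_order if speaker_words[speaker]]
-- ===== SOURCE B (Python) =====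
-- def _speaker_texts(segments):
--     speakers = dict.fromkeys(sp for sp, _ in segments)
--     return [" ".join(t for sp, t in segments if sp == speaker)
--             for speaker in speakers]
-- ===== Notes on version B (the rewrite author's own statement) =====
-- stated objective: alternative
-- what changed: B is a two-stage nested-scan algorithm: first a dedup pass collects the distinct speakers in first-appearance order, then for each speaker a fresh scan over all segments filters and joins that speaker's texts; no per-speaker lists are ever maintained, unlike A's single-pass grouping dict.
import Mathlib
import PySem

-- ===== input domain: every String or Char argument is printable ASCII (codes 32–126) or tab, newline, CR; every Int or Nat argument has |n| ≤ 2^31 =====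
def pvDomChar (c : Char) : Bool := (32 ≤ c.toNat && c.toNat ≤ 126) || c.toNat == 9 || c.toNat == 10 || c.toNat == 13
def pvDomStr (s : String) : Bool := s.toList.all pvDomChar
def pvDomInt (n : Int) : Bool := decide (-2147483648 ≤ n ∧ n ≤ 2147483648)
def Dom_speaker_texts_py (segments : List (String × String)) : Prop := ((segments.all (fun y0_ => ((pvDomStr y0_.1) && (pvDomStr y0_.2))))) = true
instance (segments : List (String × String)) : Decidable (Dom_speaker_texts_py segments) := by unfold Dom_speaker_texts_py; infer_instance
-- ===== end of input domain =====

-- B replaces A's single-pass grouping dict by a two-stage nested-scan algorithm: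
-- dedup the speakers first, then re-scan all segments once per speaker (objective: alternative).

-- ===== PORT A =====
-- state: (speaker_order, speaker_words); the branch and the append follow A line for line
def speaker_texts_py (segments : List (String × String)) : List String :=
  let st := segments.foldl
    (fun (st : List String × PySem.Dict String (List String)) seg =>
      let d2 := if st.2.contains seg.1 then st.2 else st.2.insert seg.1 []
      let order2 := if st.2.contains seg.1 then st.1 else st.1 ++ [seg.1]
      (order2, d2.modify seg.1 [] (· ++ [seg.2])))
    ([], PySem.Dict.empty)
  (st.1.filter (fun sp => decide (st.2.getD sp [] ≠ []))).map
    (fun sp => PySem.Str.join " " (st.2.getD sp []))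

-- ===== PORT B =====
-- dict.fromkeys over the speakers = first-occurrence dedup; then a fresh filtering
-- scan of all segments for each distinct speaker
def speaker_texts_py_alt (segments : List (String × String)) : List String :=
  let speakers := PySem.List.dedup (segments.map (·.1))
  speakers.map (fun speaker =>
    PySem.Str.join " " ((segments.filter (fun p => p.1 == speaker)).map (·.2)))

-- ===== PRECONDITION & SPEC =====
def Spec_speaker_texts_py (segments : List (String × String)) (out : List String) : Prop := out = speaker_texts_py_alt segments
instance (segments : List (String × String)) (out : List String) : Decidable (Spec_speaker_texts_py segments out) := by unfold Spec_speaker_texts_py; infer_instance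

-- ===== CLAIM (what is proved, stated in full; the proofs are below) =====
def Claim_equal_speaker_texts_py : Prop := ∀ (segments : List (String × String)), Dom_speaker_texts_py segments → Spec_speaker_texts_py segments (speaker_texts_py segments)

-- ===== LEMMAS AND PROOFS =====

-- A's conditional insert followed by the append is exactly a setdefault-style modify
theorem stepA_dict_eq (d : PySem.Dict String (List String)) (sp t : String) :
    (if d.contains sp then d else d.insert sp []).modify sp [] (· ++ [t])
      = d.modify sp [] (· ++ [t]) := by
  by_cases h : d.contains sp
  · simp [h]
  · have h' : d.contains sp = false := by simpa using h
    simp [h, PySem.Dict.modify, PySem.Dict.getD_insert_self,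
      PySem.Dict.getD_of_not_contains (h := h'), PySem.Dict.insert_insert_self]

-- A's fold state is (keys of the grouping dict, the grouping dict)
theorem stateA_eq (l : List (String × String)) :
    ∀ (d : PySem.Dict String (List String)),
      l.foldl
        (fun (st : List String × PySem.Dict String (List String)) seg =>
          let d2 := if st.2.contains seg.1 then st.2 else st.2.insert seg.1 []
          let order2 := if st.2.contains seg.1 then st.1 else st.1 ++ [seg.1]
          (order2, d2.modify seg.1 [] (· ++ [seg.2])))
        (d.keys, d)
      = ((l.foldl (fun d seg => d.modify seg.1 [] (· ++ [seg.2])) d).keys,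
         l.foldl (fun d seg => d.modify seg.1 [] (· ++ [seg.2])) d) := by
  induction l with
  | nil => intro d; rfl
  | cons seg l ih =>
      intro d
      simp only [List.foldl_cons]
      rw [show
        (let d2 := if d.contains seg.1 then d else d.insert seg.1 []
         let order2 := if d.contains seg.1 then d.keys else d.keys ++ [seg.1]
         (order2, d2.modify seg.1 [] (· ++ [seg.2])))
        = ((d.modify seg.1 [] (· ++ [seg.2])).keys, d.modify seg.1 [] (· ++ [seg.2])) from by
          simp only [stepA_dict_eq, PySem.Dict.keys_modify]
          by_cases h : d.contains seg.1 <;>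
            simp [h, PySem.Dict.keys_insert_of_contains, PySem.Dict.keys_insert_of_not_contains]]
      exact ih _

-- ===== VERDICT (by name: the statement is the Claim_ definition above) =====

theorem speaker_texts_py_spec : Claim_equal_speaker_texts_py := by
  intro segments _
  unfold Spec_speaker_texts_py speaker_texts_py speaker_texts_py_alt
  have hstate := stateA_eq segments (PySem.Dict.empty : PySem.Dict String (List String))
  simp only [PySem.Dict.keys_empty] at hstate
  rw [hstate]
  set g := segments.foldl (fun d seg => d.modify seg.1 [] (· ++ [seg.2]))
      (PySem.Dict.empty : PySem.Dict String (List String)) with hg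
  have hkeys : g.keys = PySem.Set.ofList (segments.map (·.1)) := by
    simpa [hg, PySem.Set.update_nil_left] using
      PySem.Dict.keys_foldl_modify_key (l := segments) (key := fun seg => seg.1)
        (d0 := ([] : List String)) (f := fun d seg => (· ++ [seg.2]))
        (d := (PySem.Dict.empty : PySem.Dict String (List String)))
  have hgetD : ∀ sp, g.getD sp [] = (segments.filter (fun p => p.1 == sp)).map (·.2) := by
    intro sp
    simpa [hg] using
      PySem.Dict.getD_foldl_modify_append (l := segments)
        (d := (PySem.Dict.empty : PySem.Dict String (List String))) (c := sp)
  have hne : ∀ sp ∈ g.keys, g.getD sp [] ≠ [] := by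
    intro sp hsp
    have hmem : sp ∈ segments.map (·.1) := by
      rw [hkeys] at hsp; exact (PySem.Set.mem_ofList _ _).1 hsp
    obtain ⟨seg, hseg, hfst⟩ := List.mem_map.1 hmem
    rw [hgetD]
    have hmemf : seg ∈ segments.filter (fun p => p.1 == sp) :=
      List.mem_filter.2 ⟨hseg, by simp [hfst]⟩
    intro hnil
    rw [List.map_eq_nil_iff] at hnil
    rw [hnil] at hmemf
    exact List.not_mem_nil hmemf
  have hfilter : g.keys.filter (fun sp => decide (g.getD sp [] ≠ [])) = g.keys :=
    List.filter_eq_self.2 (fun sp hsp => by simpa using hne sp hsp)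
  show (g.keys.filter (fun sp => decide (g.getD sp [] ≠ []))).map
      (fun sp => PySem.Str.join " " (g.getD sp []))
    = (PySem.List.dedup (segments.map (·.1))).map
      (fun speaker => PySem.Str.join " " ((segments.filter (fun p => p.1 == speaker)).map (·.2)))
  rw [hfilter, PySem.List.dedup_eq_ofList, ← hkeys]
  exact List.map_congr_left (fun sp _ => by rw [hgetD])
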